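-- pv_equiv track=rewrite | github.com/PedroDRodrigues/FP | FP_2021_Projeto_1.py | eh_posicao_jog
-- ===== SOURCE A (Python) =====
-- def eh_posicao_jog(tab, p, player):
--    con = ()
--    for l in tab:
--       for c in l:
--          con = con + (c, )
--    if con[p-1] == player:
--       return True
--    else:
--       return False
-- ===== SOURCE B (Python) =====
-- def eh_posicao_jog(tab, p, player):
--     # Walk the rows once, keeping a running index, instead of flattening the
--     # whole board into a tuple first (A's repeated tuple concatenation is O(n^2)).
--     i = p - 1
--     if i < 0:
--         i += sum(len(row) for row in tab)
--     for row in tab: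
--         if i < len(row):
--             return row[i] == player
--         i -= len(row)
-- ===== Notes on version B (the rewrite author's own statement) =====
-- stated objective: faster
-- what changed: B walks the rows once with a running index instead of flattening the whole board by repeated tuple concatenation before a single lookup; Pre_ excludes exactly the inputs where A raises IndexError (p-1 outside [-n, n) for n the number of cells).
import Mathlib
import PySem

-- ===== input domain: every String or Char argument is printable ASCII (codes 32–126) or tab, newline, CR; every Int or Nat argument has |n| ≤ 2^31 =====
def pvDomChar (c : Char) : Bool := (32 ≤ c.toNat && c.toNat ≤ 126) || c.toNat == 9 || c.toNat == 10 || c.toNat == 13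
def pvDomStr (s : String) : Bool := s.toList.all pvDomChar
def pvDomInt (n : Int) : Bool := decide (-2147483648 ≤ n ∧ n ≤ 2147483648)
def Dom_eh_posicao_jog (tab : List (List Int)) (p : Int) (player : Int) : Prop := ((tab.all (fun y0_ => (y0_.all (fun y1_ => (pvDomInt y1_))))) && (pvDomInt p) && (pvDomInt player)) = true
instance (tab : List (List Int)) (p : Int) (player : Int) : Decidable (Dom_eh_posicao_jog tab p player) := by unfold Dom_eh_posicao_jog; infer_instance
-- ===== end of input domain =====

-- B replaces A's O(n^2) flatten-by-tuple-concatenation with one O(n) walk over the rows.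

-- ===== PORT A =====
def eh_posicao_jog (tab : List (List Int)) (p : Int) (player : Int) : Bool :=
  let con := tab.foldl (fun con l => l.foldl (fun con c => con ++ [c]) con) ([] : List Int)
  match PySem.List.pyGet? con (p - 1) with
  | some v => v == player
  | none => false   -- Python raises IndexError here; excluded by Pre_

-- ===== PORT B =====
def pvGoRows (rows : List (List Int)) (i : Int) (player : Int) : Bool :=
  match rows with
  | [] => false   -- Python B falls off the loop (returns None) here; excluded by Pre_
  | row :: rest =>
    if i < PySem.List.len row then
      match PySem.List.pyGet? row i with
      | some v => v == player
      | none => false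
    else pvGoRows rest (i - PySem.List.len row) player

def eh_posicao_jog_alt (tab : List (List Int)) (p : Int) (player : Int) : Bool :=
  let i := p - 1
  let i := if i < 0 then i + tab.foldl (fun a row => a + PySem.List.len row) 0 else i
  pvGoRows tab i player

-- ===== PRECONDITION & SPEC =====
-- Pre_ excludes exactly the inputs on which A raises IndexError (p-1 outside [-n, n)).
def Pre_eh_posicao_jog (tab : List (List Int)) (p : Int) (player : Int) : Prop :=
  -(tab.flatten.length : Int) ≤ p - 1 ∧ p - 1 < (tab.flatten.length : Int)
instance (tab : List (List Int)) (p : Int) (player : Int) : Decidable (Pre_eh_posicao_jog tab p player) := by unfold Pre_eh_posicao_jog; infer_instance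

def pvWitness_eh_posicao_jog : List (List Int) × Int × Int := ([[1, 2], [3]], 2, 2)

def Spec_eh_posicao_jog (tab : List (List Int)) (p : Int) (player : Int) (out : Bool) : Prop := out = eh_posicao_jog_alt tab p player
instance (tab : List (List Int)) (p : Int) (player : Int) (out : Bool) : Decidable (Spec_eh_posicao_jog tab p player out) := by unfold Spec_eh_posicao_jog; infer_instance

-- ===== CLAIM (what is proved, stated in full; the proofs are below) =====
def Claim_equal_eh_posicao_jog : Prop := ∀ (tab : List (List Int)) (p : Int) (player : Int), Dom_eh_posicao_jog tab p player → Pre_eh_posicao_jog tab p player → Spec_eh_posicao_jog tab p player (eh_posicao_jog tab p player)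

-- ===== LEMMAS AND PROOFS =====

theorem pv_inner_foldl (l acc : List Int) :
    l.foldl (fun con c => con ++ [c]) acc = acc ++ l := by
  induction l generalizing acc with
  | nil => simp
  | cons x xs ih => simp [List.foldl, ih]

theorem pv_con_eq_flatten (tab : List (List Int)) (acc : List Int) :
    tab.foldl (fun con l => l.foldl (fun con c => con ++ [c]) con) acc = acc ++ tab.flatten := by
  induction tab generalizing acc with
  | nil => simp
  | cons r rs ih =>
      rw [List.foldl_cons, pv_inner_foldl, ih, List.flatten_cons, List.append_assoc]

theorem pv_sum_len (tab : List (List Int)) (acc : Int) :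
    tab.foldl (fun a row => a + PySem.List.len row) acc = acc + (tab.flatten.length : Int) := by
  induction tab generalizing acc with
  | nil => simp
  | cons r rs ih =>
      rw [List.foldl_cons, ih]
      simp [PySem.List.len]
      ring

theorem pv_go_eq (tab : List (List Int)) (i : Int) (player : Int)
    (h0 : 0 ≤ i) (h1 : i < (tab.flatten.length : Int)) :
    pvGoRows tab i player =
      match PySem.List.pyGet? tab.flatten i with
      | some v => v == player
      | none => false := by
  induction tab generalizing i with
  | nil => simp at h1; omega
  | cons row rest ih =>
    simp only [List.flatten_cons] at h1 ⊢
    by_cases hc : i < (row.length : Int)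
    · rw [pvGoRows]
      simp only [PySem.List.len_eq, hc, if_true]
      rw [PySem.List.pyGet?_of_nonneg _ h0, PySem.List.pyGet?_of_nonneg _ h0]
      rw [List.getElem?_append_left (by omega)]
    · rw [pvGoRows]
      simp only [PySem.List.len_eq, hc, if_false]
      have hlen : ((row ++ rest.flatten).length : Int) = row.length + rest.flatten.length := by
        simp
      rw [ih (i - row.length) (by omega) (by omega)]
      rw [PySem.List.pyGet?_of_nonneg _ (by omega : (0:Int) ≤ i - row.length),
          PySem.List.pyGet?_of_nonneg _ h0]
      rw [List.getElem?_append_right (by omega)]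
      have hidx : (i - (row.length : Int)).toNat = i.toNat - row.length := by omega
      rw [hidx]

-- ===== VERDICT (by name: the statement is the Claim_ definition above) =====
theorem eh_posicao_jog_spec : Claim_equal_eh_posicao_jog := by
  intro tab p player _ hpre
  obtain ⟨hlo, hhi⟩ := hpre
  unfold Spec_eh_posicao_jog eh_posicao_jog eh_posicao_jog_alt
  rw [pv_con_eq_flatten, pv_sum_len]
  simp only [List.nil_append, Int.zero_add]
  by_cases hneg : p - 1 < 0
  · simp only [hneg, if_true]
    rw [pv_go_eq _ _ _ (by omega) (by omega)]
    rw [PySem.List.pyGet?_of_nonneg _ (by omega : (0:Int) ≤ p - 1 + tab.flatten.length)]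
    have hA : PySem.List.pyGet? tab.flatten (p - 1)
        = tab.flatten[tab.flatten.length - (1 - p).toNat]? := by
      have hk : p - 1 = -(((1 - p).toNat : Nat) : Int) := by omega
      rw [hk]
      exact PySem.List.pyGet?_neg_natCast _ _ (by omega) (by omega)
    rw [hA]
    have hidx : tab.flatten.length - (1 - p).toNat = (p - 1 + (tab.flatten.length : Int)).toNat := by
      omega
    rw [hidx]
  · simp only [hneg, if_false]
    rw [pv_go_eq _ _ _ (by omega) hhi]
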